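-- pv_equiv track=rewrite | github.com/mkyutani/summaryreport | skills/pagereport/scripts/step8_material_summarizer.py | _collect_windows
-- ===== SOURCE A (Python) =====
-- def _collect_windows(lines: list[str], hit_indices: list[int], before: int, after: int) -> list[tuple[int, int]]:
--     if not hit_indices:
--         return []
--     intervals: list[tuple[int, int]] = []
--     for idx in hit_indices:
--         start = max(0, idx - before)
--         end = min(len(lines), idx + after + 1)
--         intervals.append((start, end))
--     intervals.sort()
--     merged: list[tuple[int, int]] = []
--     cur_s, cur_e = intervals[0]
--     for s, e in intervals[1:]:
--         if s <= cur_e: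
--             cur_e = max(cur_e, e)
--         else:
--             merged.append((cur_s, cur_e))
--             cur_s, cur_e = s, e
--     merged.append((cur_s, cur_e))
--     return merged
-- ===== SOURCE B (Python) =====
-- def _merge_two(L, R):
--     out = []
--     i = j = 0
--     cur = None
--     while i < len(L) or j < len(R):
--         if j >= len(R) or (i < len(L) and L[i] <= R[j]):
--             nxt = L[i]; i += 1
--         else:
--             nxt = R[j]; j += 1
--         if cur is None:
--             cur = nxt
--         elif nxt[0] <= cur[1]:
--             cur = (cur[0], max(cur[1], nxt[1]))
--         else:
--             out.append(cur); cur = nxt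
--     if cur is not None:
--         out.append(cur)
--     return out
--
-- def _solve(ivs):
--     if len(ivs) <= 1:
--         return list(ivs)
--     mid = len(ivs) // 2
--     return _merge_two(_solve(ivs[:mid]), _solve(ivs[mid:]))
--
-- def _collect_windows(lines, hit_indices, before, after):
--     n = len(lines)
--     return _solve([(max(0, idx - before), min(n, idx + after + 1)) for idx in hit_indices])
-- ===== Notes on version B (the rewrite author's own statement) =====
-- stated objective: alternative
-- what changed: B replaces A's sort-then-linear-merge pipeline by divide and conquer: it recursively splits the raw window list in halves and combines two already-merged halves with a fused interleave-and-merge pass, so there is no sort call and no single global merge scan.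
import Mathlib
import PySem

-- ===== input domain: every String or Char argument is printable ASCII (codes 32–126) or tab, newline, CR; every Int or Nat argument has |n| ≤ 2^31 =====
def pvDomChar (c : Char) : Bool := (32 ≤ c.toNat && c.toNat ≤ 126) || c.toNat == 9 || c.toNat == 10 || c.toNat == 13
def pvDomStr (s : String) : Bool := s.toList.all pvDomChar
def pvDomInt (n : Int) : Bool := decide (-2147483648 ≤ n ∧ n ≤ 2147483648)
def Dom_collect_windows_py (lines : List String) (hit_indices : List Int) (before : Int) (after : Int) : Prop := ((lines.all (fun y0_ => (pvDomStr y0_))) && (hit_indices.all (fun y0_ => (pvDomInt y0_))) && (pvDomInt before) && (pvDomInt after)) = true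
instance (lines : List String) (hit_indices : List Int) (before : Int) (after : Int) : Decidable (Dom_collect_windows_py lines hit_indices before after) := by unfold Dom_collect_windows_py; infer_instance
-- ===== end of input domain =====

-- B replaces A's sort-then-linear-merge by divide and conquer (recursive halving, two merged
-- halves combined by a fused interleave-and-merge pass; no sort call); objective: alternative.

-- ===== PORT A =====
def collect_windows_py (lines : List String) (hit_indices : List Int) (before : Int) (after : Int) : List (Int × Int) :=
  if hit_indices = [] then []
  else
    let intervals : List (Int × Int) :=
      hit_indices.map (fun idx => (max 0 (idx - before), min ((lines.length : Int)) (idx + after + 1)))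
    -- intervals.sort() : Python sorts the tuples lexicographically
    match PySem.List.sorted2 intervals Prod.fst Prod.snd with
    | [] => []
    | c0 :: rest =>
      let st := rest.foldl (fun (acc : List (Int × Int) × Int × Int) se =>
          if se.1 ≤ acc.2.2 then (acc.1, acc.2.1, max acc.2.2 se.2)
          else (acc.1 ++ [(acc.2.1, acc.2.2)], se.1, se.2)) ([], c0.1, c0.2)
      st.1 ++ [(st.2.1, st.2.2)]

-- ===== PORT B =====
-- Python's tuple `<=` on pairs of ints: lexicographic comparison (exact)
def pvLexLe (a b : Int × Int) : Bool := decide (a.1 < b.1) || (decide (a.1 = b.1) && decide (a.2 ≤ b.2))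

-- loop body of Source B's `_merge_two`: fold the chosen next interval into (out, cur)
def pvStepB (out : List (Int × Int)) (cur : Option (Int × Int)) (nxt : Int × Int) :
    List (Int × Int) × Option (Int × Int) :=
  match cur with
  | none => (out, some nxt)
  | some c => if nxt.1 ≤ c.2 then (out, some (c.1, max c.2 nxt.2)) else (out ++ [c], some nxt)

-- the while loop of `_merge_two` (indices i/j become structural recursion on the two lists)
def pvMergeGo : List (Int × Int) → List (Int × Int) → List (Int × Int) → Option (Int × Int) → List (Int × Int)
  | [], [], out, cur =>
      match cur with
      | none => out
      | some c => out ++ [c]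
  | [], r :: R, out, cur => pvMergeGo [] R (pvStepB out cur r).1 (pvStepB out cur r).2
  | l :: L, [], out, cur => pvMergeGo L [] (pvStepB out cur l).1 (pvStepB out cur l).2
  | l :: L, r :: R, out, cur =>
      if pvLexLe l r then pvMergeGo L (r :: R) (pvStepB out cur l).1 (pvStepB out cur l).2
      else pvMergeGo (l :: L) R (pvStepB out cur r).1 (pvStepB out cur r).2
termination_by L R _ _ => L.length + R.length
decreasing_by all_goals simp; try omega

def pvMergeTwo (L R : List (Int × Int)) : List (Int × Int) := pvMergeGo L R [] none

def pvSolve (ivs : List (Int × Int)) : List (Int × Int) :=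
  if ivs.length ≤ 1 then ivs
  else pvMergeTwo (pvSolve (ivs.take (ivs.length / 2))) (pvSolve (ivs.drop (ivs.length / 2)))
termination_by ivs.length
decreasing_by
  · simp; omega
  · simp; omega

def collect_windows_py_alt (lines : List String) (hit_indices : List Int) (before : Int) (after : Int) : List (Int × Int) :=
  pvSolve (hit_indices.map (fun idx => (max 0 (idx - before), min ((lines.length : Int)) (idx + after + 1))))

-- ===== PRECONDITION & SPEC =====
def Spec_collect_windows_py (lines : List String) (hit_indices : List Int) (before : Int) (after : Int) (out : List (Int × Int)) : Prop := out = collect_windows_py_alt lines hit_indices before after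
instance (lines : List String) (hit_indices : List Int) (before : Int) (after : Int) (out : List (Int × Int)) : Decidable (Spec_collect_windows_py lines hit_indices before after out) := by unfold Spec_collect_windows_py; infer_instance

-- ===== CLAIM (what is proved, stated in full; the proofs are below) =====
def Claim_equal_collect_windows_py : Prop := ∀ (lines : List String) (hit_indices : List Int) (before : Int) (after : Int), Dom_collect_windows_py lines hit_indices before after → Spec_collect_windows_py lines hit_indices before after (collect_windows_py lines hit_indices before after)

-- ===== LEMMAS AND PROOFS =====

def pvStepA (acc : List (Int × Int) × Int × Int) (se : Int × Int) : List (Int × Int) × Int × Int :=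
  if se.1 ≤ acc.2.2 then (acc.1, acc.2.1, max acc.2.2 se.2)
  else (acc.1 ++ [(acc.2.1, acc.2.2)], se.1, se.2)

-- A's whole pipeline applied to an already-sorted interval list
def pvScanS (zs : List (Int × Int)) : List (Int × Int) :=
  match zs with
  | [] => []
  | c0 :: rest =>
    (rest.foldl pvStepA ([], c0.1, c0.2)).1 ++
      [((rest.foldl pvStepA ([], c0.1, c0.2)).2.1, (rest.foldl pvStepA ([], c0.1, c0.2)).2.2)]

lemma pvFoldA_acc (zs : List (Int × Int)) : ∀ (a b : List (Int × Int)) (s e : Int),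
    zs.foldl pvStepA (a ++ b, s, e)
      = (a ++ (zs.foldl pvStepA (b, s, e)).1, (zs.foldl pvStepA (b, s, e)).2) := by
  induction zs with
  | nil => intro a b s e; simp
  | cons z zs ih =>
    intro a b s e
    simp only [List.foldl_cons]
    by_cases h : z.1 ≤ e
    · rw [show pvStepA (a ++ b, s, e) z = (a ++ b, s, max e z.2) from by simp [pvStepA, h],
          show pvStepA (b, s, e) z = (b, s, max e z.2) from by simp [pvStepA, h]]
      exact ih a b s (max e z.2)
    · rw [show pvStepA (a ++ b, s, e) z = (a ++ (b ++ [(s, e)]), z.1, z.2) from by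
            simp [pvStepA, h],
          show pvStepA (b, s, e) z = (b ++ [(s, e)], z.1, z.2) from by simp [pvStepA, h]]
      exact ih a (b ++ [(s, e)]) z.1 z.2

lemma pvMergeGo_scan (zs : List (Int × Int)) : ∀ (out : List (Int × Int)) (c : Int × Int),
    pvMergeGo [] zs out (some c)
      = out ++ (zs.foldl pvStepA ([], c.1, c.2)).1 ++
          [((zs.foldl pvStepA ([], c.1, c.2)).2.1, (zs.foldl pvStepA ([], c.1, c.2)).2.2)] := by
  induction zs with
  | nil => intro out c; simp [pvMergeGo]
  | cons z zs ih =>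
    intro out c
    simp only [pvMergeGo, List.foldl_cons]
    by_cases h : z.1 ≤ c.2
    · have hstep : pvStepB out (some c) z = (out, some (c.1, max c.2 z.2)) := by simp [pvStepB, h]
      have hstepA : pvStepA ([], c.1, c.2) z = ([], c.1, max c.2 z.2) := by simp [pvStepA, h]
      simp only [hstep, hstepA]
      exact ih out (c.1, max c.2 z.2)
    · have hstep : pvStepB out (some c) z = (out ++ [c], some z) := by simp [pvStepB, h]
      have hstepA : pvStepA ([], c.1, c.2) z = (([(c.1, c.2)] ++ []), z.1, z.2) := by simp [pvStepA, h]
      simp only [hstep, hstepA]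
      rw [pvFoldA_acc zs [(c.1, c.2)] [] z.1 z.2, ih (out ++ [c]) z]
      simp

lemma pvMergeGo_nil_none (zs : List (Int × Int)) (out : List (Int × Int)) :
    pvMergeGo [] zs out none = out ++ pvScanS zs := by
  cases zs with
  | nil => simp [pvMergeGo, pvScanS]
  | cons c0 rest =>
    simp only [pvMergeGo, pvStepB]
    rw [pvMergeGo_scan rest out c0]
    simp [pvScanS]

lemma pvMergeGo_swap (L : List (Int × Int)) : ∀ (out : List (Int × Int)) (cur : Option (Int × Int)),
    pvMergeGo L [] out cur = pvMergeGo [] L out cur := by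
  induction L with
  | nil => intro out cur; rfl
  | cons l L ih =>
    intro out cur
    simp only [pvMergeGo]
    rw [ih]

lemma pvMergeGo_merge (L R : List (Int × Int)) : ∀ (out : List (Int × Int)) (cur : Option (Int × Int)),
    pvMergeGo L R out cur = pvMergeGo [] (List.merge L R pvLexLe) out cur := by
  induction L, R using List.merge.induct (le := pvLexLe) with
  | case1 R => intro out cur; rw [List.nil_merge]
  | case2 L => intro out cur; rw [List.merge_right]; exact pvMergeGo_swap L out cur
  | case3 l L r R hle ih =>
    intro out cur
    rw [List.cons_merge_cons, if_pos hle]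
    simp only [pvMergeGo, hle, if_pos]
    exact ih _ _
  | case4 l L r R hle ih =>
    intro out cur
    rw [List.cons_merge_cons, if_neg hle]
    simp only [pvMergeGo, hle, Bool.false_eq_true, if_false]
    exact ih _ _

lemma pvLexLe_iff (a b : Int × Int) : pvLexLe a b = true ↔ (toLex a : Int ×ₗ Int) ≤ toLex b := by
  rw [Prod.Lex.le_iff]
  simp [pvLexLe]

-- Python's tuple sort is the sort by the lexicographic key.
lemma sorted2_eq_sorted_lex (xs : List (Int × Int)) :
    PySem.List.sorted2 xs Prod.fst Prod.snd
      = PySem.List.sorted xs (fun p => (toLex p : Int ×ₗ Int)) := by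
  have h : ∀ a b : Int × Int, (decide (a.1 < b.1) || (!decide (b.1 < a.1) && decide (a.2 < b.2)))
      = decide ((toLex a : Int ×ₗ Int) < toLex b) := by
    intro ⟨a1, a2⟩ ⟨b1, b2⟩
    rw [Bool.eq_iff_iff]; simp [Prod.Lex.lt_iff]; omega
  show List.foldl (fun acc x => PySem.List.insertBy
        (fun a b => decide (a.1 < b.1) || (!decide (b.1 < a.1) && decide (a.2 < b.2))) x acc) [] xs
     = List.foldl (fun acc x => PySem.List.insertBy
        (fun a b => decide ((toLex a : Int ×ₗ Int) < toLex b)) x acc) [] xs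
  congr 1
  funext acc x
  congr 1
  funext a b
  exact h a b

-- Any lex-sorted rearrangement of xs is its sort.
lemma sorted_lex_eq (xs ys : List (Int × Int)) (hp : ys.Perm xs)
    (hs : ys.Pairwise (fun a b => (toLex a : Int ×ₗ Int) ≤ toLex b)) :
    PySem.List.sorted xs (fun p => (toLex p : Int ×ₗ Int)) = ys := by
  have hanti : ∀ a b : Int × Int, ((toLex a : Int ×ₗ Int) ≤ toLex b) → ((toLex b : Int ×ₗ Int) ≤ toLex a) → a = b :=
    fun a b h1 h2 => congrArg ofLex (le_antisymm h1 h2)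
  have h1 := PySem.List.sorted_pairwise xs (fun p => (toLex p : Int ×ₗ Int))
  have hperm : (PySem.List.sorted xs (fun p => (toLex p : Int ×ₗ Int))).Perm ys :=
    (PySem.List.sorted_perm xs _ false).trans hp.symm
  exact List.Perm.eq_of_pairwise (fun a b _ _ => hanti a b) h1 hs hperm

-- state-style wrappers (proof layer)
def pvStep (σ : List (Int × Int) × Option (Int × Int)) (x : Int × Int) :
    List (Int × Int) × Option (Int × Int) := pvStepB σ.1 σ.2 x

def pvGo (L R : List (Int × Int)) (σ : List (Int × Int) × Option (Int × Int)) : List (Int × Int) :=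
  pvMergeGo L R σ.1 σ.2

lemma pvGo_nil_cons (r : Int × Int) (R : List (Int × Int)) (σ : List (Int × Int) × Option (Int × Int)) :
    pvGo [] (r :: R) σ = pvGo [] R (pvStep σ r) := by
  simp [pvGo, pvMergeGo, pvStep]

lemma pvGo_cons_nil (l : Int × Int) (L : List (Int × Int)) (σ : List (Int × Int) × Option (Int × Int)) :
    pvGo (l :: L) [] σ = pvGo L [] (pvStep σ l) := by
  simp [pvGo, pvMergeGo, pvStep]

lemma pvGo_cons_cons (l r : Int × Int) (L R : List (Int × Int)) (σ : List (Int × Int) × Option (Int × Int)) :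
    pvGo (l :: L) (r :: R) σ =
      if pvLexLe l r then pvGo L (r :: R) (pvStep σ l) else pvGo (l :: L) R (pvStep σ r) := by
  simp [pvGo, pvMergeGo, pvStep]

lemma pvLexLe_true_iff (a b : Int × Int) :
    pvLexLe a b = true ↔ (a.1 < b.1 ∨ (a.1 = b.1 ∧ a.2 ≤ b.2)) := by
  simp [pvLexLe]

lemma pvLexLe_trans {a b c : Int × Int} (h1 : pvLexLe a b = true) (h2 : pvLexLe b c = true) :
    pvLexLe a c = true := by
  rw [pvLexLe_true_iff] at *
  omega

lemma pvLexLe_total (a b : Int × Int) : pvLexLe a b = true ∨ pvLexLe b a = true := by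
  rw [pvLexLe_true_iff, pvLexLe_true_iff]
  omega

-- collapse of a connected pair into its glued interval
lemma pvStep_collapse (σ : List (Int × Int) × Option (Int × Int)) (z1 z2 : Int × Int)
    (hs : z1.1 ≤ z2.1) (hc : z2.1 ≤ z1.2) :
    pvStep (pvStep σ z1) z2 = pvStep σ (z1.1, max z1.2 z2.2) := by
  obtain ⟨out, cur⟩ := σ
  cases cur with
  | none => simp [pvStep, pvStepB]; omega
  | some c =>
    simp only [pvStep, pvStepB]
    by_cases h1 : z1.1 ≤ c.2
    · simp only [if_pos h1]
      have h2 : z2.1 ≤ max c.2 z1.2 := by omega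
      simp [pvStepB, h2] <;> omega
    · simp only [if_neg h1]
      have h2 : z2.1 ≤ z1.2 := hc
      simp [pvStepB, h2] <;> omega

-- commute two absorbable elements with equal first coordinate
lemma pvStep_comm_eqfst (σ : List (Int × Int) × Option (Int × Int)) (z w : Int × Int)
    (h0 : w.1 = z.1) (h1 : z.2 ≤ w.2) (h2 : z.1 ≤ z.2) :
    pvStep (pvStep σ z) w = pvStep (pvStep σ w) z := by
  obtain ⟨out, cur⟩ := σ
  cases cur with
  | none =>
    simp only [pvStep, pvStepB]
    have ha : w.1 ≤ z.2 := by omega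
    have hb : z.1 ≤ w.2 := by omega
    simp [pvStepB, ha, hb] <;> omega
  | some c =>
    simp only [pvStep, pvStepB]
    by_cases hz : z.1 ≤ c.2
    · have hw : w.1 ≤ c.2 := by omega
      simp only [if_pos hz, if_pos hw]
      have ha : w.1 ≤ max c.2 z.2 := by omega
      have hb : z.1 ≤ max c.2 w.2 := by omega
      simp [pvStepB, ha, hb] <;> omega
    · have hw : ¬ w.1 ≤ c.2 := by omega
      simp only [if_neg hz, if_neg hw]
      have ha : w.1 ≤ z.2 := by omega
      have hb : z.1 ≤ w.2 := by omega
      simp [pvStepB, ha, hb] <;> omega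

-- three-step collapse with an interloper from the other list
lemma pvStep_collapse3 (σ : List (Int × Int) × Option (Int × Int)) (z1 z2 w : Int × Int)
    (hs : z1.1 ≤ z2.1) (hc : z2.1 ≤ z1.2) (hw : w.1 ≤ z2.1) :
    pvStep (pvStep (pvStep σ z1) w) z2 = pvStep (pvStep σ (z1.1, max z1.2 z2.2)) w := by
  obtain ⟨out, cur⟩ := σ
  have hwz : w.1 ≤ z1.2 := by omega
  cases cur with
  | none =>
    simp only [pvStep, pvStepB]
    have h0 : z2.1 ≤ max z1.2 w.2 := by omega
    have h1 : w.1 ≤ max z1.2 z2.2 := by omega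
    simp [pvStepB, hwz, h0, h1] <;> omega
  | some c =>
    simp only [pvStep, pvStepB]
    split_ifs <;> simp_all <;> omega

-- commute two elements both absorbable into the current interval
lemma pvStep_comm_absorb (σ : List (Int × Int) × Option (Int × Int)) (z w : Int × Int)
    (c : Int × Int) (hcur : σ.2 = some c) (h1 : z.1 ≤ c.2) (h2 : w.1 ≤ c.2) :
    pvStep (pvStep σ z) w = pvStep (pvStep σ w) z := by
  obtain ⟨out, cur⟩ := σ
  simp only at hcur
  subst hcur
  simp only [pvStep, pvStepB]
  have ha : w.1 ≤ max c.2 z.2 := by omega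
  have hb : z.1 ≤ max c.2 w.2 := by omega
  simp [pvStepB, h1, h2, ha, hb] <;> omega

-- the state after any step has a current interval whose end dominates the stepped end
lemma pvStep_snd (σ : List (Int × Int) × Option (Int × Int)) (x : Int × Int) :
    ∃ d, (pvStep σ x).2 = some d ∧ x.2 ≤ d.2 := by
  obtain ⟨out, cur⟩ := σ
  cases cur with
  | none => exact ⟨x, rfl, le_refl _⟩
  | some c =>
    simp only [pvStep, pvStepB]
    by_cases h : x.1 ≤ c.2
    · exact ⟨(c.1, max c.2 x.2), by simp [h], by simp⟩
    · exact ⟨x, by simp [h], le_refl _⟩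

lemma pvStep_absorb (σ : List (Int × Int) × Option (Int × Int)) (x c : Int × Int)
    (hcur : σ.2 = some c) (h : x.1 ≤ c.2) : pvStep σ x = (σ.1, some (c.1, max c.2 x.2)) := by
  obtain ⟨out, cur⟩ := σ
  simp only at hcur
  subst hcur
  simp [pvStep, pvStepB, h]

-- consume the head of the right-merged list early when it is absorbable
lemma pvAux (z2 : Int × Int) (Z'' : List (Int × Int)) (hZ : ∀ u ∈ Z'', pvLexLe z2 u = true) :
    ∀ (W : List (Int × Int)) (σ : List (Int × Int) × Option (Int × Int)) (c : Int × Int),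
      σ.2 = some c → z2.1 ≤ c.2 →
      pvGo (z2 :: Z'') W σ = pvGo Z'' W (pvStep σ z2) := by
  intro W
  induction W with
  | nil => intro σ c _ _; rw [pvGo_cons_nil]
  | cons w W' ih =>
    intro σ c hcur hle
    rw [pvGo_cons_cons]
    by_cases hzw : pvLexLe z2 w
    · rw [if_pos hzw]
    · rw [if_neg hzw]
      have hw1 : w.1 ≤ z2.1 := by
        rcases pvLexLe_total z2 w with h | h
        · exact absurd h hzw
        · rw [pvLexLe_true_iff] at h; omega
      have hwc : w.1 ≤ c.2 := by omega
      have hstep := pvStep_absorb σ w c hcur hwc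
      have hcur' : (pvStep σ w).2 = some (c.1, max c.2 w.2) := by rw [hstep]
      have hle' : z2.1 ≤ (c.1, max c.2 w.2).2 := by simp; omega
      rw [ih (pvStep σ w) _ hcur' hle', ← pvStep_comm_absorb σ z2 w c hcur hle hwc]
      cases Z'' with
      | nil => rw [pvGo_nil_cons]
      | cons u Z''' =>
        rw [pvGo_cons_cons, if_neg (fun huw => hzw (pvLexLe_trans (hZ u List.mem_cons_self) huw))]

-- after the left half has emitted z1, gluing z1 with z2 is invisible
lemma pvGlue2 (z1 z2 : Int × Int) (Z'' : List (Int × Int))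
    (h12 : pvLexLe z1 z2 = true) (hc : z2.1 ≤ z1.2) (hZ : ∀ u ∈ Z'', pvLexLe z2 u = true) :
    ∀ (W : List (Int × Int)), W.Pairwise (fun a b => pvLexLe a b = true) →
      (∀ w ∈ W, pvLexLe z1 w = true) →
      ∀ σ, pvGo (z2 :: Z'') W (pvStep σ z1) = pvGo ((z1.1, max z1.2 z2.2) :: Z'') W σ := by
  have hs : z1.1 ≤ z2.1 := by rw [pvLexLe_true_iff] at h12; omega
  have hz1g : pvLexLe z1 (z1.1, max z1.2 z2.2) = true := by rw [pvLexLe_true_iff]; simp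
  have hgz2 : pvLexLe (z1.1, max z1.2 z2.2) z2 = true := by
    rw [pvLexLe_true_iff] at h12 ⊢; simp; omega
  intro W
  induction W with
  | nil =>
    intro _ _ σ
    rw [pvGo_cons_nil, pvGo_cons_nil, pvStep_collapse σ z1 z2 hs hc]
  | cons w W' ih =>
    intro hpw hWz σ
    have hWz' : ∀ w' ∈ W', pvLexLe z1 w' = true := fun w' hw' => hWz w' (List.mem_cons_of_mem _ hw')
    have hpw' := (List.pairwise_cons.mp hpw).2
    rw [pvGo_cons_cons, pvGo_cons_cons]
    by_cases hz2w : pvLexLe z2 w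
    · rw [if_pos hz2w, if_pos (pvLexLe_trans hgz2 hz2w)]
      rw [pvStep_collapse σ z1 z2 hs hc]
    · rw [if_neg hz2w]
      by_cases hgw : pvLexLe (z1.1, max z1.2 z2.2) w
      · -- glued ≤ w < z2 : absorb z2 early on the left, collapse3
        rw [if_pos hgw]
        have hw1 : w.1 ≤ z2.1 := by
          rcases pvLexLe_total z2 w with h | h
          · exact absurd h hz2w
          · rw [pvLexLe_true_iff] at h; omega
        obtain ⟨d, hd, hd2⟩ := pvStep_snd σ z1
        have hwd : w.1 ≤ d.2 := by omega
        have hstep := pvStep_absorb (pvStep σ z1) w d hd hwd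
        have hcur' : (pvStep (pvStep σ z1) w).2 = some (d.1, max d.2 w.2) := by rw [hstep]
        have hle' : z2.1 ≤ (d.1, max d.2 w.2).2 := by simp; omega
        rw [pvAux z2 Z'' hZ W' _ _ hcur' hle']
        rw [pvStep_collapse3 σ z1 z2 w hs hc hw1]
        cases Z'' with
        | nil => rw [pvGo_nil_cons]
        | cons u Z''' =>
          rw [pvGo_cons_cons, if_neg (fun huw => hz2w (pvLexLe_trans (hZ u List.mem_cons_self) huw))]
      · -- z1 ≤ w < glued : w has z1's start, commute then recurse
        rw [if_neg hgw]
        have hz1w := hWz w List.mem_cons_self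
        have hfacts : w.1 = z1.1 ∧ z1.2 ≤ w.2 := by
          rw [pvLexLe_true_iff] at hz1w
          have : ¬ (z1.1 < w.1 ∨ (z1.1 = w.1 ∧ max z1.2 z2.2 ≤ w.2)) := by
            intro h'; exact hgw (by rw [pvLexLe_true_iff]; exact h')
          omega
        rw [pvStep_comm_eqfst σ z1 w hfacts.1 hfacts.2 (by omega)]
        exact ih hpw' hWz' (pvStep σ w)

-- gluing a connected adjacent pair of the left list does not change the merge result
lemma pvGlue1 (z1 z2 : Int × Int) (Z'' : List (Int × Int))
    (h12 : pvLexLe z1 z2 = true) (hc : z2.1 ≤ z1.2) (hZ : ∀ u ∈ Z'', pvLexLe z2 u = true) :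
    ∀ (W : List (Int × Int)), W.Pairwise (fun a b => pvLexLe a b = true) →
      ∀ σ, pvGo (z1 :: z2 :: Z'') W σ = pvGo ((z1.1, max z1.2 z2.2) :: Z'') W σ := by
  have hz1g : pvLexLe z1 (z1.1, max z1.2 z2.2) = true := by rw [pvLexLe_true_iff]; simp
  intro W
  induction W with
  | nil =>
    intro _ σ
    rw [pvGo_cons_nil]
    exact pvGlue2 z1 z2 Z'' h12 hc hZ [] (by simp) (by simp) σ
  | cons w W' ih =>
    intro hpw σ
    have hpw' := (List.pairwise_cons.mp hpw).2
    by_cases h1w : pvLexLe z1 w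
    · rw [pvGo_cons_cons, if_pos h1w]
      refine pvGlue2 z1 z2 Z'' h12 hc hZ (w :: W') hpw ?_ σ
      intro w' hw'
      rcases List.mem_cons.mp hw' with rfl | hw''
      · exact h1w
      · exact pvLexLe_trans h1w ((List.pairwise_cons.mp hpw).1 w' hw'')
    · have hgw : ¬ pvLexLe (z1.1, max z1.2 z2.2) w = true :=
        fun hgw => h1w (pvLexLe_trans hz1g hgw)
      rw [pvGo_cons_cons, if_neg h1w, pvGo_cons_cons, if_neg hgw]
      exact ih hpw' (pvStep σ w)


lemma pvScanS_rec (c z : Int × Int) (t : List (Int × Int)) :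
    pvScanS (c :: z :: t)
      = if z.1 ≤ c.2 then pvScanS ((c.1, max c.2 z.2) :: t) else c :: pvScanS (z :: t) := by
  by_cases h : z.1 ≤ c.2
  · rw [if_pos h]
    simp only [pvScanS, List.foldl_cons]
    rw [show pvStepA ([], c.1, c.2) z = ([], c.1, max c.2 z.2) from by simp [pvStepA, h]]
  · rw [if_neg h]
    simp only [pvScanS, List.foldl_cons]
    rw [show pvStepA ([], c.1, c.2) z = ([(c.1, c.2)] ++ [], z.1, z.2) from by simp [pvStepA, h]]
    rw [pvFoldA_acc]
    simp

lemma pvScanS_single (z : Int × Int) : pvScanS [z] = [z] := by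
  simp [pvScanS]

lemma pvSorted_glue {z1 z2 : Int × Int} {t : List (Int × Int)}
    (hs : (z1 :: z2 :: t).Pairwise (fun a b => pvLexLe a b = true)) :
    ((z1.1, max z1.2 z2.2) :: t).Pairwise (fun a b => pvLexLe a b = true) := by
  rw [List.pairwise_cons] at hs ⊢
  obtain ⟨h1, hs2⟩ := hs
  rw [List.pairwise_cons] at hs2
  refine ⟨?_, hs2.2⟩
  intro u hu
  have ha := h1 z2 List.mem_cons_self
  have hb := h1 u (List.mem_cons_of_mem _ hu)
  have hc := hs2.1 u hu
  rw [pvLexLe_true_iff] at *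
  omega

-- every element of the scan of a sorted list dominates a common lower bound
lemma pvScanS_lb : ∀ (n : Nat) (Z : List (Int × Int)), Z.length ≤ n →
    Z.Pairwise (fun a b => pvLexLe a b = true) →
    ∀ x, (∀ z ∈ Z, pvLexLe x z = true) → ∀ p ∈ pvScanS Z, pvLexLe x p = true := by
  intro n
  induction n with
  | zero =>
    intro Z hn _ x _ p hp
    have hZ : Z = [] := by cases Z <;> simp_all
    subst hZ
    simp [pvScanS] at hp
  | succ n ih =>
    intro Z hn hs x hx p hp
    match Z with
    | [] => simp [pvScanS] at hp
    | [z] =>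
      rw [pvScanS_single] at hp
      rcases List.mem_singleton.mp hp with rfl
      exact hx p List.mem_cons_self
    | z1 :: z2 :: t =>
      have h12 : pvLexLe z1 z2 = true := (List.pairwise_cons.mp hs).1 z2 List.mem_cons_self
      have hz1g : pvLexLe z1 (z1.1, max z1.2 z2.2) = true := by rw [pvLexLe_true_iff]; simp
      by_cases hcon : z2.1 ≤ z1.2
      · rw [pvScanS_rec, if_pos hcon] at hp
        refine ih _ (by simp at hn ⊢; omega) (pvSorted_glue hs) x ?_ p hp
        intro z hz
        rcases List.mem_cons.mp hz with rfl | hz'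
        · exact pvLexLe_trans (hx z1 List.mem_cons_self) hz1g
        · exact hx z (List.mem_cons_of_mem _ (List.mem_cons_of_mem _ hz'))
      · rw [pvScanS_rec, if_neg hcon] at hp
        rcases List.mem_cons.mp hp with rfl | hp'
        · exact hx p List.mem_cons_self
        · refine ih _ (by simp at hn ⊢; omega) (List.pairwise_cons.mp hs).2 x ?_ p hp'
          intro z hz
          exact hx z (List.mem_cons_of_mem _ hz)

lemma pvScanS_sorted : ∀ (n : Nat) (Z : List (Int × Int)), Z.length ≤ n →
    Z.Pairwise (fun a b => pvLexLe a b = true) →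
    (pvScanS Z).Pairwise (fun a b => pvLexLe a b = true) := by
  intro n
  induction n with
  | zero =>
    intro Z hn _
    have hZ : Z = [] := by cases Z <;> simp_all
    subst hZ
    simp [pvScanS]
  | succ n ih =>
    intro Z hn hs
    match Z with
    | [] => simp [pvScanS]
    | [z] => rw [pvScanS_single]; simp
    | z1 :: z2 :: t =>
      by_cases hcon : z2.1 ≤ z1.2
      · rw [pvScanS_rec, if_pos hcon]
        exact ih _ (by simp at hn ⊢; omega) (pvSorted_glue hs)
      · rw [pvScanS_rec, if_neg hcon]
        rw [List.pairwise_cons]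
        refine ⟨?_, ih _ (by simp at hn ⊢; omega) (List.pairwise_cons.mp hs).2⟩
        intro p hp
        exact pvScanS_lb (z2 :: t).length (z2 :: t) (le_refl _) (List.pairwise_cons.mp hs).2
          z1 ((List.pairwise_cons.mp hs).1) p hp

lemma pvT : ∀ (n : Nat) (Z W : List (Int × Int)) (σ : List (Int × Int) × Option (Int × Int)),
    Z.length + W.length ≤ n →
    Z.Pairwise (fun a b => pvLexLe a b = true) →
    W.Pairwise (fun a b => pvLexLe a b = true) →
    pvGo (pvScanS Z) W σ = pvGo Z W σ := by
  intro n
  induction n with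
  | zero =>
    intro Z W σ hn _ _
    have hZ : Z = [] := by cases Z <;> simp_all
    subst hZ
    rfl
  | succ n ih =>
    intro Z W σ hn hZ hW
    match Z with
    | [] => rfl
    | [z] => rw [pvScanS_single]
    | z1 :: z2 :: t =>
      have h12 : pvLexLe z1 z2 = true := (List.pairwise_cons.mp hZ).1 z2 List.mem_cons_self
      by_cases hcon : z2.1 ≤ z1.2
      · rw [pvScanS_rec, if_pos hcon]
        rw [ih ((z1.1, max z1.2 z2.2) :: t) W σ (by simp at hn ⊢; omega) (pvSorted_glue hZ) hW]
        refine (pvGlue1 z1 z2 t h12 hcon ?_ W hW σ).symm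
        exact (List.pairwise_cons.mp (List.pairwise_cons.mp hZ).2).1
      · rw [pvScanS_rec, if_neg hcon]
        have hZ2 : (z2 :: t).Pairwise (fun a b => pvLexLe a b = true) := (List.pairwise_cons.mp hZ).2
        match W with
        | [] =>
          rw [pvGo_cons_nil, pvGo_cons_nil]
          exact ih (z2 :: t) [] (pvStep σ z1) (by simp at hn ⊢; omega) hZ2 (by simp)
        | w :: W' =>
          rw [pvGo_cons_cons, pvGo_cons_cons]
          by_cases h1w : pvLexLe z1 w
          · rw [if_pos h1w, if_pos h1w]
            exact ih (z2 :: t) (w :: W') (pvStep σ z1) (by simp at hn ⊢; omega) hZ2 hW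
          · rw [if_neg h1w, if_neg h1w]
            rw [show z1 :: pvScanS (z2 :: t) = pvScanS (z1 :: z2 :: t) from by
                  rw [pvScanS_rec, if_neg hcon]]
            exact ih (z1 :: z2 :: t) W' (pvStep σ w) (by simp at hn ⊢; omega) hZ
              (List.pairwise_cons.mp hW).2

-- mirrored suite: the scanned list is the RIGHT argument of the merge
lemma pvAuxR (z2 : Int × Int) (Z'' : List (Int × Int)) (hZ : ∀ u ∈ Z'', pvLexLe z2 u = true) :
    ∀ (W : List (Int × Int)) (σ : List (Int × Int) × Option (Int × Int)) (c : Int × Int),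
      σ.2 = some c → z2.1 ≤ c.2 →
      pvGo W (z2 :: Z'') σ = pvGo W Z'' (pvStep σ z2) := by
  intro W
  induction W with
  | nil => intro σ c _ _; rw [pvGo_nil_cons]
  | cons w W' ih =>
    intro σ c hcur hle
    rw [pvGo_cons_cons]
    by_cases hwz : pvLexLe w z2
    · rw [if_pos hwz]
      have hw1 : w.1 ≤ z2.1 := by rw [pvLexLe_true_iff] at hwz; omega
      have hwc : w.1 ≤ c.2 := by omega
      have hstep := pvStep_absorb σ w c hcur hwc
      have hcur' : (pvStep σ w).2 = some (c.1, max c.2 w.2) := by rw [hstep]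
      have hle' : z2.1 ≤ (c.1, max c.2 w.2).2 := by simp; omega
      rw [ih (pvStep σ w) _ hcur' hle', ← pvStep_comm_absorb σ z2 w c hcur hle hwc]
      cases Z'' with
      | nil => rw [pvGo_cons_nil]
      | cons u Z''' =>
        rw [pvGo_cons_cons, if_pos (pvLexLe_trans hwz (hZ u List.mem_cons_self))]
    · rw [if_neg hwz]

lemma pvGlue2R (z1 z2 : Int × Int) (Z'' : List (Int × Int))
    (h12 : pvLexLe z1 z2 = true) (hc : z2.1 ≤ z1.2) (hZ : ∀ u ∈ Z'', pvLexLe z2 u = true) :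
    ∀ (W : List (Int × Int)), W.Pairwise (fun a b => pvLexLe a b = true) →
      (∀ w ∈ W, pvLexLe w z1 = false) →
      ∀ τ, pvGo W (z2 :: Z'') (pvStep τ z1) = pvGo W ((z1.1, max z1.2 z2.2) :: Z'') τ := by
  have hs : z1.1 ≤ z2.1 := by rw [pvLexLe_true_iff] at h12; omega
  have hgz2 : pvLexLe (z1.1, max z1.2 z2.2) z2 = true := by
    rw [pvLexLe_true_iff] at h12 ⊢; simp; omega
  intro W
  induction W with
  | nil =>
    intro _ _ τ
    rw [pvGo_nil_cons, pvGo_nil_cons, pvStep_collapse τ z1 z2 hs hc]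
  | cons w W' ih =>
    intro hpw hWz τ
    have hWz' : ∀ w' ∈ W', pvLexLe w' z1 = false := fun w' hw' => hWz w' (List.mem_cons_of_mem _ hw')
    have hpw' := (List.pairwise_cons.mp hpw).2
    rw [pvGo_cons_cons, pvGo_cons_cons]
    by_cases hwg : pvLexLe w (z1.1, max z1.2 z2.2)
    · -- z1 < w ≤ glued : w has z1's start, commute then recurse
      rw [if_pos hwg, if_pos (pvLexLe_trans hwg hgz2)]
      have hw1 := hWz w List.mem_cons_self
      have hfacts : w.1 = z1.1 ∧ z1.2 ≤ w.2 := by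
        have h1 : ¬ (w.1 < z1.1 ∨ (w.1 = z1.1 ∧ w.2 ≤ z1.2)) := by
          intro h'
          rw [← pvLexLe_true_iff] at h'
          simp [h'] at hw1
        rw [pvLexLe_true_iff] at hwg
        simp at hwg
        omega
      rw [pvStep_comm_eqfst τ z1 w hfacts.1 hfacts.2 (by omega)]
      exact ih hpw' hWz' (pvStep τ w)
    · rw [if_neg hwg]
      by_cases hwz2 : pvLexLe w z2
      · -- glued < w ≤ z2 : absorb z2 early on the left, collapse3
        rw [if_pos hwz2]
        have hw1 : w.1 ≤ z2.1 := by rw [pvLexLe_true_iff] at hwz2; omega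
        obtain ⟨d, hd, hd2⟩ := pvStep_snd τ z1
        have hwd : w.1 ≤ d.2 := by omega
        have hstep := pvStep_absorb (pvStep τ z1) w d hd hwd
        have hcur' : (pvStep (pvStep τ z1) w).2 = some (d.1, max d.2 w.2) := by rw [hstep]
        have hle' : z2.1 ≤ (d.1, max d.2 w.2).2 := by simp; omega
        rw [pvAuxR z2 Z'' hZ W' _ _ hcur' hle']
        rw [pvStep_collapse3 τ z1 z2 w hs hc hw1]
        cases Z'' with
        | nil => rw [pvGo_cons_nil]
        | cons u Z''' =>
          rw [pvGo_cons_cons, if_pos (pvLexLe_trans hwz2 (hZ u List.mem_cons_self))]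
      · -- z2 < w : both sides consume the pair / glued interval
        rw [if_neg hwz2, pvStep_collapse τ z1 z2 hs hc]
  
lemma pvGlue1R (z1 z2 : Int × Int) (Z'' : List (Int × Int))
    (h12 : pvLexLe z1 z2 = true) (hc : z2.1 ≤ z1.2) (hZ : ∀ u ∈ Z'', pvLexLe z2 u = true) :
    ∀ (W : List (Int × Int)), W.Pairwise (fun a b => pvLexLe a b = true) →
      ∀ σ, pvGo W (z1 :: z2 :: Z'') σ = pvGo W ((z1.1, max z1.2 z2.2) :: Z'') σ := by
  have hz1g : pvLexLe z1 (z1.1, max z1.2 z2.2) = true := by rw [pvLexLe_true_iff]; simp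
  intro W
  induction W with
  | nil =>
    intro _ σ
    rw [pvGo_nil_cons]
    exact pvGlue2R z1 z2 Z'' h12 hc hZ [] (by simp) (by simp) σ
  | cons w W' ih =>
    intro hpw σ
    have hpw' := (List.pairwise_cons.mp hpw).2
    by_cases hw1 : pvLexLe w z1
    · rw [pvGo_cons_cons, if_pos hw1, pvGo_cons_cons,
          if_pos (pvLexLe_trans hw1 hz1g)]
      exact ih hpw' (pvStep σ w)
    · rw [pvGo_cons_cons, if_neg hw1]
      refine pvGlue2R z1 z2 Z'' h12 hc hZ (w :: W') hpw ?_ σ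
      intro w' hw'
      rcases List.mem_cons.mp hw' with rfl | hw''
      · simp only [Bool.not_eq_true] at hw1; exact hw1
      · by_contra hcon
        simp only [Bool.not_eq_false] at hcon
        exact hw1 (pvLexLe_trans ((List.pairwise_cons.mp hpw).1 w' hw'') hcon)

lemma pvTR : ∀ (n : Nat) (L Z : List (Int × Int)) (σ : List (Int × Int) × Option (Int × Int)),
    L.length + Z.length ≤ n →
    L.Pairwise (fun a b => pvLexLe a b = true) →
    Z.Pairwise (fun a b => pvLexLe a b = true) →
    pvGo L (pvScanS Z) σ = pvGo L Z σ := by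
  intro n
  induction n with
  | zero =>
    intro L Z σ hn _ _
    have hZ : Z = [] := by cases Z <;> simp_all
    subst hZ
    rfl
  | succ n ih =>
    intro L Z σ hn hL hZ
    match Z with
    | [] => rfl
    | [z] => rw [pvScanS_single]
    | z1 :: z2 :: t =>
      have h12 : pvLexLe z1 z2 = true := (List.pairwise_cons.mp hZ).1 z2 List.mem_cons_self
      by_cases hcon : z2.1 ≤ z1.2
      · rw [pvScanS_rec, if_pos hcon]
        rw [ih L ((z1.1, max z1.2 z2.2) :: t) σ (by simp at hn ⊢; omega) hL (pvSorted_glue hZ)]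
        refine (pvGlue1R z1 z2 t h12 hcon ?_ L hL σ).symm
        exact (List.pairwise_cons.mp (List.pairwise_cons.mp hZ).2).1
      · rw [pvScanS_rec, if_neg hcon]
        have hZ2 : (z2 :: t).Pairwise (fun a b => pvLexLe a b = true) := (List.pairwise_cons.mp hZ).2
        match L with
        | [] =>
          rw [pvGo_nil_cons, pvGo_nil_cons]
          exact ih [] (z2 :: t) (pvStep σ z1) (by simp at hn ⊢; omega) (by simp) hZ2
        | w :: W' =>
          rw [pvGo_cons_cons, pvGo_cons_cons]
          by_cases hw1 : pvLexLe w z1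
          · rw [if_pos hw1, if_pos hw1]
            rw [show z1 :: pvScanS (z2 :: t) = pvScanS (z1 :: z2 :: t) from by
                  rw [pvScanS_rec, if_neg hcon]]
            exact ih W' (z1 :: z2 :: t) (pvStep σ w) (by simp at hn ⊢; omega)
              (List.pairwise_cons.mp hL).2 hZ
          · rw [if_neg hw1, if_neg hw1]
            exact ih (w :: W') (z2 :: t) (pvStep σ z1) (by simp at hn ⊢; omega) hL hZ2

-- main: the divide-and-conquer solver computes A's scan of the sorted interval list
lemma pvSolve_eq_scan_sorted (ivs : List (Int × Int)) :
    pvSolve ivs = pvScanS (PySem.List.sorted ivs (fun p => (toLex p : Int ×ₗ Int))) := by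
  induction ivs using pvSolve.induct with
  | case1 ivs h =>
    rw [pvSolve, if_pos h]
    match ivs, h with
    | [], _ => rfl
    | [x], _ =>
      show [x] = pvScanS [x]
      rw [pvScanS_single]
  | case2 ivs h ih1 ih2 =>
    rw [pvSolve, if_neg h, ih1, ih2]
    have hsT : (PySem.List.sorted (ivs.take (ivs.length / 2)) (fun p => (toLex p : Int ×ₗ Int))).Pairwise
        (fun a b => pvLexLe a b = true) := by
      refine List.Pairwise.imp ?_ (PySem.List.sorted_pairwise _ _)
      intro a b h'
      exact (pvLexLe_iff a b).mpr h'
    have hsD : (PySem.List.sorted (ivs.drop (ivs.length / 2)) (fun p => (toLex p : Int ×ₗ Int))).Pairwise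
        (fun a b => pvLexLe a b = true) := by
      refine List.Pairwise.imp ?_ (PySem.List.sorted_pairwise _ _)
      intro a b h'
      exact (pvLexLe_iff a b).mpr h'
    have hscanD := pvScanS_sorted _ _ (le_refl _) hsD
    calc pvMergeTwo (pvScanS (PySem.List.sorted (ivs.take (ivs.length / 2)) (fun p => (toLex p : Int ×ₗ Int))))
            (pvScanS (PySem.List.sorted (ivs.drop (ivs.length / 2)) (fun p => (toLex p : Int ×ₗ Int))))
        = pvGo (pvScanS (PySem.List.sorted (ivs.take (ivs.length / 2)) (fun p => (toLex p : Int ×ₗ Int))))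
            (pvScanS (PySem.List.sorted (ivs.drop (ivs.length / 2)) (fun p => (toLex p : Int ×ₗ Int)))) ([], none) := rfl
      _ = pvGo (PySem.List.sorted (ivs.take (ivs.length / 2)) (fun p => (toLex p : Int ×ₗ Int)))
            (pvScanS (PySem.List.sorted (ivs.drop (ivs.length / 2)) (fun p => (toLex p : Int ×ₗ Int)))) ([], none) :=
          pvT _ _ _ _ (le_refl _) hsT hscanD
      _ = pvGo (PySem.List.sorted (ivs.take (ivs.length / 2)) (fun p => (toLex p : Int ×ₗ Int)))
            (PySem.List.sorted (ivs.drop (ivs.length / 2)) (fun p => (toLex p : Int ×ₗ Int))) ([], none) :=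
          pvTR _ _ _ _ (le_refl _) hsT hsD
      _ = pvMergeGo []
            (List.merge (PySem.List.sorted (ivs.take (ivs.length / 2)) (fun p => (toLex p : Int ×ₗ Int)))
              (PySem.List.sorted (ivs.drop (ivs.length / 2)) (fun p => (toLex p : Int ×ₗ Int))) pvLexLe) [] none :=
          pvMergeGo_merge _ _ [] none
      _ = pvScanS (List.merge (PySem.List.sorted (ivs.take (ivs.length / 2)) (fun p => (toLex p : Int ×ₗ Int)))
              (PySem.List.sorted (ivs.drop (ivs.length / 2)) (fun p => (toLex p : Int ×ₗ Int))) pvLexLe) := by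
          rw [pvMergeGo_nil_none]; simp
      _ = pvScanS (PySem.List.sorted ivs (fun p => (toLex p : Int ×ₗ Int))) := by
          congr 1
          have hmergepw := List.pairwise_merge
            (le := pvLexLe)
            (fun a b c hab hbc => pvLexLe_trans hab hbc)
            (fun a b => by
              rcases pvLexLe_total a b with h' | h' <;> simp [h'])
            _ _ hsT hsD
          have hperm : (List.merge (PySem.List.sorted (ivs.take (ivs.length / 2)) (fun p => (toLex p : Int ×ₗ Int)))
                (PySem.List.sorted (ivs.drop (ivs.length / 2)) (fun p => (toLex p : Int ×ₗ Int))) pvLexLe).Perm ivs := by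
            refine (List.merge_perm_append pvLexLe).trans ?_
            refine ((PySem.List.sorted_perm _ _ false).append (PySem.List.sorted_perm _ _ false)).trans ?_
            rw [List.take_append_drop]
          refine (sorted_lex_eq ivs _ hperm (List.Pairwise.imp ?_ hmergepw)).symm
          intro a b h'
          exact (pvLexLe_iff a b).mp h'

-- ===== VERDICT (by name: the statement is the Claim_ definition above) =====
theorem collect_windows_py_spec : Claim_equal_collect_windows_py := by
  intro lines hit_indices before after _
  unfold Spec_collect_windows_py collect_windows_py collect_windows_py_alt
  show (if hit_indices = [] then []
        else
          match PySem.List.sorted2 (hit_indices.map (fun idx => (max 0 (idx - before), min ((lines.length : Int)) (idx + after + 1)))) Prod.fst Prod.snd with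
          | [] => []
          | c0 :: rest =>
            (rest.foldl pvStepA ([], c0.1, c0.2)).1 ++
              [((rest.foldl pvStepA ([], c0.1, c0.2)).2.1, (rest.foldl pvStepA ([], c0.1, c0.2)).2.2)])
      = pvSolve (hit_indices.map (fun idx => (max 0 (idx - before), min ((lines.length : Int)) (idx + after + 1))))
  rw [pvSolve_eq_scan_sorted]
  by_cases hne : hit_indices = []
  · subst hne
    rfl
  · rw [if_neg hne, sorted2_eq_sorted_lex]
    cases hS : PySem.List.sorted (hit_indices.map (fun idx => (max 0 (idx - before), min ((lines.length : Int)) (idx + after + 1)))) (fun p => (toLex p : Int ×ₗ Int)) with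
    | nil => rfl
    | cons c0 rest => rfl
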